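-- pv_equiv track=rewrite | github.com/PrimCFD/SolverLES | scripts/postprocess_scaling.py | is_nice_factorization
-- ===== SOURCE A (Python) =====
-- def is_nice_factorization(N, R):
--     divs = [d for d in range(1, R+1) if R % d == 0]
--     for px in divs:
--         if N % px != 0:
--             continue
--         for py in divs:
--             if (R // px) % py != 0:
--                 continue
--             pz = R // (px*py)
--             if pz < 1:
--                 continue
--             if N % py == 0 and N % pz == 0:
--                 return True
--     return False
-- ===== SOURCE B (Python) =====
-- def is_nice_factorization(N, R):
--     if R < 1:
--         return False
--     small = []
--     large = []
--     i = 1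
--     while i * i <= R:
--         if R % i == 0:
--             small.append(i)
--             if i != R // i:
--                 large.append(R // i)
--         i += 1
--     divs = small + large[::-1]
--     return any(
--         N % px == 0
--         and any(
--             (R // px) % py == 0 and N % py == 0 and N % (R // (px * py)) == 0
--             for py in divs
--         )
--         for px in divs
--     )
-- ===== Notes on version B (the rewrite author's own statement) =====
-- stated objective: faster
-- what changed: B enumerates the divisors of R by trial division up to sqrt(R) (collecting each divisor i and its cofactor R//i) instead of scanning every d in 1..R, and replaces the two continue/return loops by nested any(...) comprehensions without A's redundant pz<1 guard.
import Mathlib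
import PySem

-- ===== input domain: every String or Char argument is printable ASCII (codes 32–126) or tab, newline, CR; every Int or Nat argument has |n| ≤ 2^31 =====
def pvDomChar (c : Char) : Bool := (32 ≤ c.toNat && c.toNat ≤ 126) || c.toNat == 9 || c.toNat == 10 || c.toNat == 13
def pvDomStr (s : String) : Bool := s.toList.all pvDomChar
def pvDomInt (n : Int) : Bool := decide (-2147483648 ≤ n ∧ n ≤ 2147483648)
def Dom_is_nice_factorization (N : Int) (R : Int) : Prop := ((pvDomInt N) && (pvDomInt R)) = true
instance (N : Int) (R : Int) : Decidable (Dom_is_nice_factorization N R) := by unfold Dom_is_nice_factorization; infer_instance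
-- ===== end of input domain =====

-- B enumerates the divisors of R by trial division up to sqrt(R) instead of scanning 1..R,
-- and replaces the two continue-laden loops by nested any(...) comprehensions; faster in a timing run.

-- ===== PORT A =====
-- inner 'for py in divs' loop of A (continue/return structure kept)
def pvInnerA (N R px : Int) : List Int → Bool
  | [] => false
  | py :: rest =>
    if PySem.Int.mod (PySem.Int.floordiv R px) py ≠ 0 then pvInnerA N R px rest
    else
      let pz := PySem.Int.floordiv R (px * py)
      if pz < 1 then pvInnerA N R px rest
      else if PySem.Int.mod N py = 0 ∧ PySem.Int.mod N pz = 0 then true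
      else pvInnerA N R px rest

-- outer 'for px in divs' loop of A
def pvOuterA (N R : Int) (divs : List Int) : List Int → Bool
  | [] => false
  | px :: rest =>
    if PySem.Int.mod N px ≠ 0 then pvOuterA N R divs rest
    else if pvInnerA N R px divs then true
    else pvOuterA N R divs rest

def is_nice_factorization (N : Int) (R : Int) : Bool :=
  let divs := (PySem.List.pyRange 1 (R + 1) 1).filter (fun d => PySem.Int.mod R d == 0)
  pvOuterA N R divs divs

-- ===== PORT B =====
-- 'while i * i <= R' trial-division loop of B, accumulating small and large divisors
def pvTrial (R : Int) (i : Int) (small large : List Int) : List Int × List Int :=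
  if h : i * i ≤ R then
    if PySem.Int.mod R i = 0 then
      pvTrial R (i + 1) (small ++ [i])
        (if i ≠ PySem.Int.floordiv R i then large ++ [PySem.Int.floordiv R i] else large)
    else pvTrial R (i + 1) small large
  else (small, large)
termination_by (R + 1 - i).toNat
decreasing_by
  all_goals
    have hii : i ≤ i * i := by nlinarith
    omega

def is_nice_factorization_alt (N : Int) (R : Int) : Bool :=
  if R < 1 then false
  else
    let p := pvTrial R 1 [] []
    let divs := p.1 ++ p.2.reverse
    divs.any (fun px =>
      PySem.Int.mod N px == 0 &&
      divs.any (fun py =>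
        PySem.Int.mod (PySem.Int.floordiv R px) py == 0 &&
        PySem.Int.mod N py == 0 &&
        PySem.Int.mod N (PySem.Int.floordiv R (px * py)) == 0))

-- ===== PRECONDITION & SPEC =====
def Spec_is_nice_factorization (N : Int) (R : Int) (out : Bool) : Prop := out = is_nice_factorization_alt N R
instance (N : Int) (R : Int) (out : Bool) : Decidable (Spec_is_nice_factorization N R out) := by unfold Spec_is_nice_factorization; infer_instance

-- ===== CLAIM (what is proved, stated in full; the proofs are below) =====
def Claim_equal_is_nice_factorization : Prop := ∀ (N : Int) (R : Int), Dom_is_nice_factorization N R → Spec_is_nice_factorization N R (is_nice_factorization N R)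

-- ===== LEMMAS AND PROOFS =====

-- A's divisor list
def pvDivsA (R : Int) : List Int :=
  (PySem.List.pyRange 1 (R + 1) 1).filter (fun d => PySem.Int.mod R d == 0)

-- B's divisor list
def pvDivsB (R : Int) : List Int :=
  (pvTrial R 1 [] []).1 ++ (pvTrial R 1 [] []).2.reverse

-- A's inner-loop test as a predicate
def pvFA (N R px py : Int) : Bool :=
  decide (PySem.Int.mod (PySem.Int.floordiv R px) py = 0 ∧
    ¬ PySem.Int.floordiv R (px * py) < 1 ∧
    PySem.Int.mod N py = 0 ∧ PySem.Int.mod N (PySem.Int.floordiv R (px * py)) = 0)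

-- B's inner test as a predicate
def pvFB (N R px py : Int) : Bool :=
  PySem.Int.mod (PySem.Int.floordiv R px) py == 0 &&
  PySem.Int.mod N py == 0 &&
  PySem.Int.mod N (PySem.Int.floordiv R (px * py)) == 0
lemma pvInnerA_eq_any (N R px : Int) (l : List Int) :
    pvInnerA N R px l = l.any (pvFA N R px) := by
  induction l with
  | nil => simp [pvInnerA]
  | cons py rest ih =>
    simp only [pvInnerA, List.any_cons, pvFA, ← ih]
    split_ifs with h1 h2 h3 <;> simp_all

lemma pvOuterA_eq_any (N R : Int) (divs l : List Int) :
    pvOuterA N R divs l = l.any (fun px => PySem.Int.mod N px == 0 && pvInnerA N R px divs) := by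
  induction l with
  | nil => simp [pvOuterA]
  | cons px rest ih =>
    simp only [pvOuterA, List.any_cons, ← ih]
    split_ifs with h1 h2 <;> simp_all

lemma pv_any_ext {l1 l2 : List Int} {f : Int → Bool} (h : ∀ x, x ∈ l1 ↔ x ∈ l2) :
    l1.any f = l2.any f := by
  rw [Bool.eq_iff_iff]
  simp only [List.any_eq_true]
  constructor
  · rintro ⟨x, hx, hf⟩; exact ⟨x, (h x).mp hx, hf⟩
  · rintro ⟨x, hx, hf⟩; exact ⟨x, (h x).mpr hx, hf⟩

lemma pv_mem_divsA {R x : Int} (hR : 1 ≤ R) : x ∈ pvDivsA R ↔ 1 ≤ x ∧ x ∣ R := by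
  simp only [pvDivsA, List.mem_filter, PySem.List.mem_pyRange_one, beq_iff_eq,
    PySem.Int.mod_eq_zero_iff_dvd]
  constructor
  · rintro ⟨⟨h1, _⟩, hd⟩; exact ⟨h1, hd⟩
  · rintro ⟨h1, hd⟩
    exact ⟨⟨h1, by have := Int.le_of_dvd (by omega) hd; omega⟩, hd⟩
set_option maxHeartbeats 1000000 in
lemma pvTrial_mem (R i : Int) (s l : List Int) (x : Int) :
    1 ≤ i → ((x ∈ (pvTrial R i s l).1 ∨ x ∈ (pvTrial R i s l).2) ↔
      x ∈ s ∨ x ∈ l ∨ ∃ j, i ≤ j ∧ j * j ≤ R ∧ j ∣ R ∧ (x = j ∨ x = PySem.Int.floordiv R j)) := by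
  fun_induction pvTrial R i s l with
  | case1 i s l h hmod ih =>
    intro hi
    rw [PySem.Int.mod_eq_zero_iff_dvd] at hmod
    refine Iff.trans (ih (by omega)) ?_
    have hstep : (∃ j, i ≤ j ∧ j * j ≤ R ∧ j ∣ R ∧ (x = j ∨ x = PySem.Int.floordiv R j)) ↔
        ((x = i ∨ x = PySem.Int.floordiv R i) ∨
          ∃ j, i + 1 ≤ j ∧ j * j ≤ R ∧ j ∣ R ∧ (x = j ∨ x = PySem.Int.floordiv R j)) := by
      constructor
      · rintro ⟨j, hj1, hj2, hj3, hj4⟩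
        by_cases hji : j = i
        · rw [hji] at hj4; exact Or.inl hj4
        · exact Or.inr ⟨j, by omega, hj2, hj3, hj4⟩
      · rintro (h4 | ⟨j, hj1, hj2, hj3, hj4⟩)
        · exact ⟨i, le_refl i, h, hmod, h4⟩
        · exact ⟨j, by omega, hj2, hj3, hj4⟩
    rw [hstep]
    by_cases hne : i ≠ PySem.Int.floordiv R i
    · simp only [dif_pos hne, List.mem_append, List.mem_singleton]
      constructor
      · rintro (⟨hs | hx⟩ | (hl | hx) | hrest)
        · exact Or.inl hs
        · exact Or.inr (Or.inr (Or.inl (Or.inl hx)))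
        · exact Or.inr (Or.inl hl)
        · exact Or.inr (Or.inr (Or.inl (Or.inr hx)))
        · exact Or.inr (Or.inr (Or.inr hrest))
      · rintro (hs | hl | (hx | hx) | hrest)
        · exact Or.inl (Or.inl hs)
        · exact Or.inr (Or.inl (Or.inl hl))
        · exact Or.inl (Or.inr hx)
        · exact Or.inr (Or.inl (Or.inr hx))
        · exact Or.inr (Or.inr hrest)
    · simp only [dif_neg hne, List.mem_append, List.mem_singleton]
      have hei : i = PySem.Int.floordiv R i := not_not.mp hne
      constructor
      · rintro (⟨hs | hx⟩ | hl | hrest)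
        · exact Or.inl hs
        · exact Or.inr (Or.inr (Or.inl (Or.inl hx)))
        · exact Or.inr (Or.inl hl)
        · exact Or.inr (Or.inr (Or.inr hrest))
      · rintro (hs | hl | (hx | hx) | hrest)
        · exact Or.inl (Or.inl hs)
        · exact Or.inr (Or.inl hl)
        · exact Or.inl (Or.inr hx)
        · exact Or.inl (Or.inr (by rw [hx, ← hei]))
        · exact Or.inr (Or.inr hrest)
  | case2 i s l h hmod ih =>
    intro hi
    rw [PySem.Int.mod_eq_zero_iff_dvd] at hmod
    refine Iff.trans (ih (by omega)) ?_
    constructor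
    · rintro (h1 | h1 | ⟨j, hj1, hj2, hj3, hj4⟩)
      · exact Or.inl h1
      · exact Or.inr (Or.inl h1)
      · exact Or.inr (Or.inr ⟨j, by omega, hj2, hj3, hj4⟩)
    · rintro (h1 | h1 | ⟨j, hj1, hj2, hj3, hj4⟩)
      · exact Or.inl h1
      · exact Or.inr (Or.inl h1)
      · have : j ≠ i := by rintro rfl; exact hmod hj3
        exact Or.inr (Or.inr ⟨j, by omega, hj2, hj3, hj4⟩)
  | case3 i s l h =>
    intro hi
    have hemp : ¬ ∃ j, i ≤ j ∧ j * j ≤ R ∧ j ∣ R ∧ (x = j ∨ x = PySem.Int.floordiv R j) := by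
      rintro ⟨j, hj1, hj2, -, -⟩
      have : i * i ≤ j * j := by nlinarith
      omega
    change x ∈ s ∨ x ∈ l ↔ _
    constructor
    · rintro (hs | hl)
      · exact Or.inl hs
      · exact Or.inr (Or.inl hl)
    · rintro (hs | hl | he)
      · exact Or.inl hs
      · exact Or.inr hl
      · exact absurd he hemp
lemma pv_mem_divsB {R x : Int} (hR : 1 ≤ R) : x ∈ pvDivsB R ↔ 1 ≤ x ∧ x ∣ R := by
  have h := pvTrial_mem R 1 [] [] x (by norm_num)
  simp only [List.not_mem_nil, false_or] at h
  rw [pvDivsB, List.mem_append, List.mem_reverse, h]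
  constructor
  · rintro ⟨j, hj1, hj2, hj3, hx | hx⟩
    · subst hx; exact ⟨hj1, hj3⟩
    · obtain ⟨c, hc⟩ := hj3
      have hfd : PySem.Int.floordiv R j = c := by
        rw [PySem.Int.floordiv_eq_ediv_of_pos (by omega), hc,
          Int.mul_ediv_cancel_left c (by omega)]
      subst hx
      rw [hfd]
      have hc1 : 1 ≤ c := by nlinarith
      exact ⟨hc1, ⟨j, by rw [hc]; ring⟩⟩
  · rintro ⟨hx1, hxd⟩
    obtain ⟨c, hc⟩ := hxd
    have hc1 : 1 ≤ c := by nlinarith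
    by_cases hsm : x * x ≤ R
    · exact ⟨x, hx1, hsm, ⟨c, hc⟩, Or.inl rfl⟩
    · refine ⟨c, hc1, by nlinarith, ⟨x, by rw [hc]; ring⟩, Or.inr ?_⟩
      rw [PySem.Int.floordiv_eq_ediv_of_pos (by omega), hc, mul_comm x c,
        Int.mul_ediv_cancel_left x (by omega)]

lemma pvFA_eq_pvFB {N R px py : Int} (hR : 1 ≤ R)
    (hpx : 1 ≤ px ∧ px ∣ R) (hpy : 1 ≤ py ∧ py ∣ R) :
    pvFA N R px py = pvFB N R px py := by
  obtain ⟨hpx1, hpxd⟩ := hpx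
  obtain ⟨hpy1, hpyd⟩ := hpy
  by_cases hc1 : PySem.Int.mod (PySem.Int.floordiv R px) py = 0
  · have hpz : ¬ PySem.Int.floordiv R (px * py) < 1 := by
      rw [PySem.Int.mod_eq_zero_iff_dvd] at hc1
      obtain ⟨k, hk⟩ := hpxd
      have hfd : PySem.Int.floordiv R px = k := by
        rw [PySem.Int.floordiv_eq_ediv_of_pos (by omega), hk,
          Int.mul_ediv_cancel_left k (by omega)]
      rw [hfd] at hc1
      obtain ⟨t, ht⟩ := hc1
      have hdvd : px * py ∣ R := ⟨t, by rw [hk, ht]; ring⟩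
      have hle : px * py ≤ R := Int.le_of_dvd (by omega) hdvd
      have h1 : (1 : Int) ≤ PySem.Int.floordiv R (px * py) := by
        rw [PySem.Int.le_floordiv_iff_mul_le (by positivity)]
        omega
      omega
    simp [pvFA, pvFB, hc1, hpz, Bool.beq_eq_decide_eq]
  · simp [pvFA, pvFB, hc1]
lemma pv_any_congr {l : List Int} {f g : Int → Bool} (h : ∀ x ∈ l, f x = g x) :
    l.any f = l.any g := by
  induction l with
  | nil => rfl
  | cons a t ih =>
    simp only [List.any_cons, h a (List.mem_cons_self), ih (fun x hx => h x (List.mem_cons_of_mem a hx))]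

theorem pv_main (N R : Int) : is_nice_factorization N R = is_nice_factorization_alt N R := by
  by_cases hR : R < 1
  · have hnil : pvDivsA R = [] := by
      rw [pvDivsA, PySem.List.pyRange_one_eq_nil (by omega)]
      rfl
    have hA : is_nice_factorization N R = pvOuterA N R (pvDivsA R) (pvDivsA R) := rfl
    rw [hA, hnil, is_nice_factorization_alt, if_pos hR]
    rfl
  · have hR : 1 ≤ R := by omega
    have hA : is_nice_factorization N R =
        (pvDivsA R).any (fun px => PySem.Int.mod N px == 0 && (pvDivsA R).any (pvFA N R px)) := by
      have : is_nice_factorization N R = pvOuterA N R (pvDivsA R) (pvDivsA R) := rfl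
      rw [this, pvOuterA_eq_any]
      simp only [pvInnerA_eq_any]
    have hB : is_nice_factorization_alt N R =
        (pvDivsB R).any (fun px => PySem.Int.mod N px == 0 && (pvDivsB R).any (pvFB N R px)) := by
      rw [is_nice_factorization_alt, if_neg (by omega)]
      rfl
    rw [hA, hB]
    have hinner : ∀ px, (pvDivsA R).any (pvFB N R px) = (pvDivsB R).any (pvFB N R px) :=
      fun px => pv_any_ext (fun y => (pv_mem_divsA hR).trans (pv_mem_divsB hR).symm)
    calc (pvDivsA R).any (fun px => PySem.Int.mod N px == 0 && (pvDivsA R).any (pvFA N R px))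
        = (pvDivsA R).any (fun px => PySem.Int.mod N px == 0 && (pvDivsB R).any (pvFB N R px)) := by
          refine pv_any_congr (fun px hpx => ?_)
          rw [← hinner px]
          have hmem := (pv_mem_divsA hR).mp hpx
          have : (pvDivsA R).any (pvFA N R px) = (pvDivsA R).any (pvFB N R px) :=
            pv_any_congr (fun py hpy => pvFA_eq_pvFB hR hmem ((pv_mem_divsA hR).mp hpy))
          rw [this]
      _ = (pvDivsB R).any (fun px => PySem.Int.mod N px == 0 && (pvDivsB R).any (pvFB N R px)) :=
          pv_any_ext (fun y => (pv_mem_divsA hR).trans (pv_mem_divsB hR).symm)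

-- ===== VERDICT (by name: the statement is the Claim_ definition above) =====
theorem is_nice_factorization_spec : Claim_equal_is_nice_factorization := by
  intro N R _
  unfold Spec_is_nice_factorization
  exact pv_main N R
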